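-- pv_equiv track=rewrite | github.com/853108389/drivence_test | data_gen/generate_logic_scene.py | split_pc
-- ===== SOURCE A (Python) =====
-- def split_pc(labels):
--     inx_road_arr = []
--     inx_other_road_arr = []
--     inx_other_ground_arr = []
--     inx_no_road_arr = []
--     inx_npc_arr = []
--     inx_buiding_arr = []
--
--     for i in range(len(labels)):
--         lb = labels[i][0]
--         if lb == 40:
--             inx_road_arr.append(i)
--         if lb in (10, 11, 15, 18, 20, 30, 31, 32, 71):
--             inx_npc_arr.append(i)
--         elif lb == 44:
--             inx_other_road_arr.append(i)
--         elif lb == 48: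
--             inx_other_road_arr.append(i)
--         elif lb in (49, 70, 72):
--             inx_other_ground_arr.append(i)
--         elif lb in (50, 80):
--             inx_buiding_arr.append(i)
--         else:
--             inx_no_road_arr.append(i)
--
--     return inx_road_arr, inx_other_road_arr, inx_other_ground_arr, inx_no_road_arr, inx_npc_arr, inx_buiding_arr
-- ===== SOURCE B (Python) =====
-- NPC = frozenset((10, 11, 15, 18, 20, 30, 31, 32, 71))
-- OTHER_ROAD = frozenset((44, 48))
-- OTHER_GROUND = frozenset((49, 70, 72))
-- BUILDING = frozenset((50, 80))
-- MATCHED = NPC | OTHER_ROAD | OTHER_GROUND | BUILDING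
--
--
-- def split_pc(labels):
--     pts = [(i, l[0]) for i, l in enumerate(labels)]
--     road = [i for i, lb in pts if lb == 40]
--     other_road = [i for i, lb in pts if lb in OTHER_ROAD]
--     other_ground = [i for i, lb in pts if lb in OTHER_GROUND]
--     no_road = [i for i, lb in pts if lb not in MATCHED]
--     npc = [i for i, lb in pts if lb in NPC]
--     building = [i for i, lb in pts if lb in BUILDING]
--     return road, other_road, other_ground, no_road, npc, building
-- ===== Notes on version B (the rewrite author's own statement) =====
-- stated objective: simpler
-- what changed: Replaces A's single index loop with a stateful if/elif cascade over six mutable accumulators by one enumerate pass extracting (index, label) pairs followed by six independent membership-set comprehensions, exploiting that the label groups are disjoint.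
import Mathlib
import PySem

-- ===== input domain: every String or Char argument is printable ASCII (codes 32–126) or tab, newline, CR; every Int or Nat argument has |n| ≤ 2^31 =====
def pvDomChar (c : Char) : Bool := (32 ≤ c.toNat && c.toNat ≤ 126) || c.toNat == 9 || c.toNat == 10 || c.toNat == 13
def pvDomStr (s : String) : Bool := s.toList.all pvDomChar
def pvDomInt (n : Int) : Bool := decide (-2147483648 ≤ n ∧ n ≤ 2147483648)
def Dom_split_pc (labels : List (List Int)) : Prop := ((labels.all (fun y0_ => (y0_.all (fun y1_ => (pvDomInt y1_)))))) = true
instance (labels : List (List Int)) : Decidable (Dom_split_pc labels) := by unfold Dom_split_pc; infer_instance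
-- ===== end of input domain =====

-- B replaces A's index loop with a branch cascade by one enumerate pass and per-bucket
-- membership comprehensions (objective: simpler / more idiomatic; same O(n) cost).


-- ===== PORT A =====
-- labels[i][0] is fetched with pyGet?; getD is only a totaliser — Pre_ keeps every
-- index in range, where pyGet? returns some and the default is never used.
def split_pc (labels : List (List Int)) : List Int × List Int × List Int × List Int × List Int × List Int :=
  (PySem.List.pyRange 0 labels.length 1).foldl
    (fun s i =>
      let lb : Int := (PySem.List.pyGet? ((PySem.List.pyGet? labels i).getD []) 0).getD 0
      let road := if lb = 40 then s.1 ++ [i] else s.1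
      if lb ∈ ([10, 11, 15, 18, 20, 30, 31, 32, 71] : List Int) then
        (road, s.2.1, s.2.2.1, s.2.2.2.1, s.2.2.2.2.1 ++ [i], s.2.2.2.2.2)
      else if lb = 44 then
        (road, s.2.1 ++ [i], s.2.2.1, s.2.2.2.1, s.2.2.2.2.1, s.2.2.2.2.2)
      else if lb = 48 then
        (road, s.2.1 ++ [i], s.2.2.1, s.2.2.2.1, s.2.2.2.2.1, s.2.2.2.2.2)
      else if lb ∈ ([49, 70, 72] : List Int) then
        (road, s.2.1, s.2.2.1 ++ [i], s.2.2.2.1, s.2.2.2.2.1, s.2.2.2.2.2)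
      else if lb ∈ ([50, 80] : List Int) then
        (road, s.2.1, s.2.2.1, s.2.2.2.1, s.2.2.2.2.1, s.2.2.2.2.2 ++ [i])
      else
        (road, s.2.1, s.2.2.1, s.2.2.2.1 ++ [i], s.2.2.2.2.1, s.2.2.2.2.2))
    ([], [], [], [], [], [])

-- ===== PORT B =====
def npcLabels : List Int := [10, 11, 15, 18, 20, 30, 31, 32, 71]
def otherRoadLabels : List Int := [44, 48]
def otherGroundLabels : List Int := [49, 70, 72]
def buildingLabels : List Int := [50, 80]
def matchedLabels : List Int := npcLabels ++ otherRoadLabels ++ otherGroundLabels ++ buildingLabels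

def split_pc_alt (labels : List (List Int)) : List Int × List Int × List Int × List Int × List Int × List Int :=
  let pts : List (Int × Int) :=
    (PySem.List.enumerate labels 0).map (fun p => (p.1, (PySem.List.pyGet? p.2 0).getD 0))
  ((pts.filter (fun p => p.2 = 40)).map (·.1),
   (pts.filter (fun p => p.2 ∈ otherRoadLabels)).map (·.1),
   (pts.filter (fun p => p.2 ∈ otherGroundLabels)).map (·.1),
   (pts.filter (fun p => p.2 ∉ matchedLabels)).map (·.1),
   (pts.filter (fun p => p.2 ∈ npcLabels)).map (·.1),
   (pts.filter (fun p => p.2 ∈ buildingLabels)).map (·.1))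

-- ===== PRECONDITION & SPEC =====
-- Pre_ excludes inputs containing an empty inner list, on which Python A raises IndexError at labels[i][0].
def Pre_split_pc (labels : List (List Int)) : Prop := ∀ l ∈ labels, l ≠ []
instance (labels : List (List Int)) : Decidable (Pre_split_pc labels) := by unfold Pre_split_pc; infer_instance
def pvWitness_split_pc : List (List Int) := [[40], [10, 3], [44], [0], [80]]

def Spec_split_pc (labels : List (List Int)) (out : List Int × List Int × List Int × List Int × List Int × List Int) : Prop := out = split_pc_alt labels
instance (labels : List (List Int)) (out : List Int × List Int × List Int × List Int × List Int × List Int) : Decidable (Spec_split_pc labels out) := by unfold Spec_split_pc; infer_instance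

-- ===== CLAIM (what is proved, stated in full; the proofs are below) =====
def Claim_equal_split_pc : Prop := ∀ (labels : List (List Int)), Dom_split_pc labels → Pre_split_pc labels → Spec_split_pc labels (split_pc labels)

-- ===== LEMMAS AND PROOFS =====

-- A's loop body, as a function of the accumulator tuple and the pair (index, first label).
def stepA (s : List Int × List Int × List Int × List Int × List Int × List Int) (p : Int × Int) :
    List Int × List Int × List Int × List Int × List Int × List Int :=
  let road := if p.2 = 40 then s.1 ++ [p.1] else s.1
  if p.2 ∈ npcLabels then (road, s.2.1, s.2.2.1, s.2.2.2.1, s.2.2.2.2.1 ++ [p.1], s.2.2.2.2.2)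
  else if p.2 = 44 then (road, s.2.1 ++ [p.1], s.2.2.1, s.2.2.2.1, s.2.2.2.2.1, s.2.2.2.2.2)
  else if p.2 = 48 then (road, s.2.1 ++ [p.1], s.2.2.1, s.2.2.2.1, s.2.2.2.2.1, s.2.2.2.2.2)
  else if p.2 ∈ otherGroundLabels then (road, s.2.1, s.2.2.1 ++ [p.1], s.2.2.2.1, s.2.2.2.2.1, s.2.2.2.2.2)
  else if p.2 ∈ buildingLabels then (road, s.2.1, s.2.2.1, s.2.2.2.1, s.2.2.2.2.1, s.2.2.2.2.2 ++ [p.1])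
  else (road, s.2.1, s.2.2.1, s.2.2.2.1 ++ [p.1], s.2.2.2.2.1, s.2.2.2.2.2)

-- One element of the fold performs exactly B's six filtered appends.
lemma stepA_eq (s : List Int × List Int × List Int × List Int × List Int × List Int) (p : Int × Int) :
    stepA s p =
      (s.1 ++ (([p].filter (fun q => q.2 = 40)).map (·.1)),
       s.2.1 ++ (([p].filter (fun q => q.2 ∈ otherRoadLabels)).map (·.1)),
       s.2.2.1 ++ (([p].filter (fun q => q.2 ∈ otherGroundLabels)).map (·.1)),
       s.2.2.2.1 ++ (([p].filter (fun q => q.2 ∉ matchedLabels)).map (·.1)),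
       s.2.2.2.2.1 ++ (([p].filter (fun q => q.2 ∈ npcLabels)).map (·.1)),
       s.2.2.2.2.2 ++ (([p].filter (fun q => q.2 ∈ buildingLabels)).map (·.1))) := by
  obtain ⟨i, lb⟩ := p
  simp only [stepA, npcLabels, otherRoadLabels, otherGroundLabels, buildingLabels, matchedLabels,
    List.filter, List.mem_cons, List.mem_append, List.not_mem_nil]
  split_ifs <;> simp_all <;>
    (rcases ‹_ ∨ _› with rfl | rfl | rfl | rfl | rfl | rfl | rfl | rfl | rfl <;> simp_all)

-- Folding stepA from any accumulators appends B's six filtered index lists.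
lemma foldl_stepA (ps : List (Int × Int))
    (r orr og nr np b : List Int) :
    ps.foldl stepA (r, orr, og, nr, np, b) =
      (r ++ ((ps.filter (fun q => q.2 = 40)).map (·.1)),
       orr ++ ((ps.filter (fun q => q.2 ∈ otherRoadLabels)).map (·.1)),
       og ++ ((ps.filter (fun q => q.2 ∈ otherGroundLabels)).map (·.1)),
       nr ++ ((ps.filter (fun q => q.2 ∉ matchedLabels)).map (·.1)),
       np ++ ((ps.filter (fun q => q.2 ∈ npcLabels)).map (·.1)),
       b ++ ((ps.filter (fun q => q.2 ∈ buildingLabels)).map (·.1))) := by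
  induction ps generalizing r orr og nr np b with
  | nil => simp
  | cons p ps ih =>
    rw [List.foldl_cons, stepA_eq, ih]
    simp [List.filter_cons]
    split_ifs <;> simp

-- A's fold over range(len) with indexing equals the fold of stepA over B's pts list.
lemma split_pc_eq_foldl (labels : List (List Int)) :
    split_pc labels =
      ((PySem.List.enumerate labels 0).map
        (fun p => (p.1, (PySem.List.pyGet? p.2 0).getD 0))).foldl stepA ([], [], [], [], [], []) := by
  rw [List.foldl_map, PySem.List.enumerate_eq_map_pyRange labels ([] : List Int), List.foldl_map]
  unfold split_pc stepA
  simp [PySem.List.pyGetD, npcLabels, otherGroundLabels, buildingLabels]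

-- ===== VERDICT (by name: the statement is the Claim_ definition above) =====
theorem split_pc_spec : Claim_equal_split_pc := by
  intro labels _ _
  unfold Spec_split_pc split_pc_alt
  rw [split_pc_eq_foldl, foldl_stepA]
  simp
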